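-- pv_equiv track=rewrite | github.com/dfergs93/radiology-protocols | docs/scripts/protocol_formatters.py | determine_protocol_type
-- ===== SOURCE A (Python) =====
-- def clean_value(value):
--     """Clean and format CSV values"""
--     if not value or value.lower() in ['n/a', 'none', '']:
--         return 'N/A'
--     return value.strip()
--
-- def determine_protocol_type(row):
--     """Determine protocol type from various fields"""
--     protocol_name = row.get('protocol_name', '').lower()
--
--     if 'gated' in protocol_name or 'cardiac' in protocol_name:
--         return 'Cardiac Gated'
--     elif 'cta' in protocol_name or 'ctv' in protocol_name:
--         return 'Vascular'
--     elif 'trauma' in protocol_name: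
--         return 'Trauma'
--     elif 'hrct' in protocol_name or 'lung' in protocol_name:
--         return 'Chest/Pulmonary'
--     elif any(x in protocol_name for x in ['brain', 'head', 'stroke', 'sinus', 'temporal']):
--         return 'Neuroradiology'
--     elif any(x in protocol_name for x in ['spine', 'myelogram']):
--         return 'Spine'
--     elif any(x in protocol_name for x in ['ankle', 'foot', 'knee', 'hip', 'shoulder', 'elbow', 'wrist', 'hand']):
--         return 'Musculoskeletal'
--     elif clean_value(row.get('contrast_agent')) == 'N/A':
--         return 'Non-Contrast'
--     else:
--         return 'Contrast-Enhanced'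
-- ===== SOURCE B (Python) =====
-- # Flat keyword->priority table; compute the minimum priority over ALL matching
-- # keywords in one full pass (no early return, no keyword groups), then map the
-- # best priority to its label; fall back on the contrast field when nothing matched.
--
-- KEYWORDS = [
--     ('gated', 0), ('cardiac', 0),
--     ('cta', 1), ('ctv', 1),
--     ('trauma', 2),
--     ('hrct', 3), ('lung', 3),
--     ('brain', 4), ('head', 4), ('stroke', 4), ('sinus', 4), ('temporal', 4),
--     ('spine', 5), ('myelogram', 5),
--     ('ankle', 6), ('foot', 6), ('knee', 6), ('hip', 6),
--     ('shoulder', 6), ('elbow', 6), ('wrist', 6), ('hand', 6),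
-- ]
--
-- LABELS = ['Cardiac Gated', 'Vascular', 'Trauma', 'Chest/Pulmonary',
--           'Neuroradiology', 'Spine', 'Musculoskeletal']
--
-- def clean_value(value):
--     """Clean and format CSV values"""
--     if not value or value.lower() in ['n/a', 'none', '']:
--         return 'N/A'
--     return value.strip()
--
-- def determine_protocol_type(row):
--     """Determine protocol type from various fields"""
--     name = row.get('protocol_name', '').lower()
--     best = len(LABELS)
--     for kw, rank in KEYWORDS:
--         if kw in name:
--             best = min(best, rank)
--     if best < len(LABELS):
--         return LABELS[best]
--     return 'Non-Contrast' if clean_value(row.get('contrast_agent')) == 'N/A' else 'Contrast-Enhanced'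
-- ===== Notes on version B (the rewrite author's own statement) =====
-- stated objective: alternative
-- what changed: Replaces A's ordered if/elif group chain with early return by a flat keyword-to-priority table scanned in one full pass, aggregating the minimum priority over all matching keywords and mapping it to a label; correct because A's answer is the label of the lowest-priority group containing any matching keyword.
import Mathlib
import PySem

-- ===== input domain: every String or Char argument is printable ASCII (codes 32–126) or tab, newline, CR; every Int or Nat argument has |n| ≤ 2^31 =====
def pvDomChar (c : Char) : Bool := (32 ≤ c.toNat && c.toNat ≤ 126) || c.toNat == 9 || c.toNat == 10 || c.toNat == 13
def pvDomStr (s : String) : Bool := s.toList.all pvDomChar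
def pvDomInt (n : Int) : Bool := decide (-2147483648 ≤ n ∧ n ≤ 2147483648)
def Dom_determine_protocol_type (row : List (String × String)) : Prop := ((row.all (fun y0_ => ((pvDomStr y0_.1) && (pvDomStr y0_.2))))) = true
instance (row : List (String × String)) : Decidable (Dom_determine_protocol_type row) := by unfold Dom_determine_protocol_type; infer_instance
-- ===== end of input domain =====

-- B replaces A's ordered if/elif group chain by a flat keyword→priority table aggregated with min over all matches; same return value.

-- ===== PORT A =====
-- clean_value(value): value : Option String (None ↔ key absent)
def pv_clean_value (value : Option String) : String :=
  match value with
  | none => "N/A"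
  | some v =>
    if v = "" || (PySem.Str.lower v = "n/a" || PySem.Str.lower v = "none" || PySem.Str.lower v = "") then "N/A"
    else PySem.Str.strip v

def determine_protocol_type (row : List (String × String)) : String :=
  let protocol_name := PySem.Str.lower ((PySem.Dict.mk row).getD "protocol_name" "")
  if PySem.Str.isIn "gated" protocol_name || PySem.Str.isIn "cardiac" protocol_name then "Cardiac Gated"
  else if PySem.Str.isIn "cta" protocol_name || PySem.Str.isIn "ctv" protocol_name then "Vascular"
  else if PySem.Str.isIn "trauma" protocol_name then "Trauma"
  else if PySem.Str.isIn "hrct" protocol_name || PySem.Str.isIn "lung" protocol_name then "Chest/Pulmonary"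
  else if (["brain", "head", "stroke", "sinus", "temporal"].any fun x => PySem.Str.isIn x protocol_name) then "Neuroradiology"
  else if (["spine", "myelogram"].any fun x => PySem.Str.isIn x protocol_name) then "Spine"
  else if (["ankle", "foot", "knee", "hip", "shoulder", "elbow", "wrist", "hand"].any fun x => PySem.Str.isIn x protocol_name) then "Musculoskeletal"
  else if pv_clean_value ((PySem.Dict.mk row).get? "contrast_agent") = "N/A" then "Non-Contrast"
  else "Contrast-Enhanced"

-- ===== PORT B =====
def pvKeywords : List (String × Nat) :=
  [("gated", 0), ("cardiac", 0),
   ("cta", 1), ("ctv", 1),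
   ("trauma", 2),
   ("hrct", 3), ("lung", 3),
   ("brain", 4), ("head", 4), ("stroke", 4), ("sinus", 4), ("temporal", 4),
   ("spine", 5), ("myelogram", 5),
   ("ankle", 6), ("foot", 6), ("knee", 6), ("hip", 6),
   ("shoulder", 6), ("elbow", 6), ("wrist", 6), ("hand", 6)]

def pvLabels : List String :=
  ["Cardiac Gated", "Vascular", "Trauma", "Chest/Pulmonary",
   "Neuroradiology", "Spine", "Musculoskeletal"]

def determine_protocol_type_alt (row : List (String × String)) : String :=
  let name := PySem.Str.lower ((PySem.Dict.mk row).getD "protocol_name" "")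
  let best := pvKeywords.foldl
    (fun best p => if PySem.Str.isIn p.1 name then min best p.2 else best) pvLabels.length
  if best < pvLabels.length then
    pvLabels.getD best ""   -- exact: LABELS[best] with best < len(LABELS) guaranteed by the guard
  else if pv_clean_value ((PySem.Dict.mk row).get? "contrast_agent") = "N/A" then "Non-Contrast"
  else "Contrast-Enhanced"

-- ===== PRECONDITION & SPEC =====
def Spec_determine_protocol_type (row : List (String × String)) (out : String) : Prop := out = determine_protocol_type_alt row
instance (row : List (String × String)) (out : String) : Decidable (Spec_determine_protocol_type row out) := by unfold Spec_determine_protocol_type; infer_instance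

-- ===== CLAIM =====
def Claim_equal_determine_protocol_type : Prop := ∀ (row : List (String × String)), Dom_determine_protocol_type row → Spec_determine_protocol_type row (determine_protocol_type row)

-- ===== LEMMAS AND PROOFS =====

-- A's chain and B's min-fold, as functions of the lowered name and the contrast fallback string.
def pvChainFn (nm fb : String) : String :=
  if PySem.Str.isIn "gated" nm || PySem.Str.isIn "cardiac" nm then "Cardiac Gated"
  else if PySem.Str.isIn "cta" nm || PySem.Str.isIn "ctv" nm then "Vascular"
  else if PySem.Str.isIn "trauma" nm then "Trauma"
  else if PySem.Str.isIn "hrct" nm || PySem.Str.isIn "lung" nm then "Chest/Pulmonary"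
  else if (["brain", "head", "stroke", "sinus", "temporal"].any fun x => PySem.Str.isIn x nm) then "Neuroradiology"
  else if (["spine", "myelogram"].any fun x => PySem.Str.isIn x nm) then "Spine"
  else if (["ankle", "foot", "knee", "hip", "shoulder", "elbow", "wrist", "hand"].any fun x => PySem.Str.isIn x nm) then "Musculoskeletal"
  else fb

def pvStep (nm : String) (best : Nat) (p : String × Nat) : Nat :=
  if PySem.Str.isIn p.1 nm then min best p.2 else best

def pvBestFn (nm fb : String) : String :=
  let best := pvKeywords.foldl (pvStep nm) pvLabels.length
  if best < pvLabels.length then pvLabels.getD best "" else fb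

theorem pvfold_le_init (nm : String) (l : List (String × Nat)) (a : Nat) :
    l.foldl (pvStep nm) a ≤ a := by
  induction l generalizing a with
  | nil => exact Nat.le_refl a
  | cons p t ih =>
    refine Nat.le_trans (ih (pvStep nm a p)) ?_
    unfold pvStep; split
    · exact Nat.min_le_left _ _
    · exact Nat.le_refl a

theorem pvfold_le_of_mem (nm : String) (l : List (String × Nat)) (a : Nat) (k : String) (r : Nat)
    (hm : (k, r) ∈ l) (h : PySem.Str.isIn k nm = true) :
    l.foldl (pvStep nm) a ≤ r := by
  induction l generalizing a with
  | nil => cases hm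
  | cons p t ih =>
    rcases List.mem_cons.mp hm with he | ht
    · refine Nat.le_trans (pvfold_le_init nm t (pvStep nm a p)) ?_
      rw [← he]; unfold pvStep; simp only [h, if_pos]
      exact Nat.min_le_right _ _
    · exact ih (pvStep nm a p) ht

theorem pvfold_ge (nm : String) (l : List (String × Nat)) (a r : Nat)
    (ha : r ≤ a) (h : ∀ p ∈ l, PySem.Str.isIn p.1 nm = true → r ≤ p.2) :
    r ≤ l.foldl (pvStep nm) a := by
  induction l generalizing a with
  | nil => exact ha
  | cons p t ih =>
    refine ih (pvStep nm a p) ?_ (fun q hq => h q (List.mem_cons_of_mem p hq))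
    unfold pvStep; split
    · next hc => exact le_min ha (h p (List.mem_cons_self) hc)
    · exact ha

theorem pvfold_all_false (nm : String) (l : List (String × Nat)) (a : Nat)
    (h : ∀ p ∈ l, PySem.Str.isIn p.1 nm = false) :
    l.foldl (pvStep nm) a = a := by
  induction l generalizing a with
  | nil => rfl
  | cons p t ih =>
    have hp := h p (List.mem_cons_self)
    have hstep : pvStep nm a p = a := by unfold pvStep; simp only [hp, Bool.false_eq_true, if_false]
    rw [List.foldl_cons, hstep]
    exact ih a (fun q hq => h q (List.mem_cons_of_mem p hq))

theorem pvBestFn_of (nm fb : String) (k : String) (i : Nat)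
    (hmem : (k, i) ∈ pvKeywords) (hk : PySem.Str.isIn k nm = true)
    (hlow : ∀ p ∈ pvKeywords, PySem.Str.isIn p.1 nm = true → i ≤ p.2)
    (hi : i < pvLabels.length) :
    pvBestFn nm fb = pvLabels.getD i "" := by
  have hbest : pvKeywords.foldl (pvStep nm) pvLabels.length = i :=
    Nat.le_antisymm (pvfold_le_of_mem nm pvKeywords _ k i hmem hk)
      (pvfold_ge nm pvKeywords _ i (Nat.le_of_lt hi) hlow)
  unfold pvBestFn
  rw [hbest, if_pos hi]

theorem pvChainFn_eq_pvBestFn (nm fb : String) : pvChainFn nm fb = pvBestFn nm fb := by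
  by_cases h1 : (PySem.Str.isIn "gated" nm || PySem.Str.isIn "cardiac" nm) = true
  · have key : ∃ k ∈ ["gated", "cardiac"], PySem.Str.isIn k nm = true := by
      simp only [Bool.or_eq_true_iff, List.any_eq_true] at h1
      rcases h1 with h|h <;> exact ⟨_, by simp, h⟩
    obtain ⟨k, hkmem, hk⟩ := key
    have hb : pvBestFn nm fb = pvLabels.getD 0 "" := by
      refine pvBestFn_of nm fb k 0 ?_ hk ?_ (by norm_num [pvLabels])
      · fin_cases hkmem <;> decide
      · intro p hp hpt
        fin_cases hp <;> simp_all
    rw [hb]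
    unfold pvChainFn
    simp only [List.any, Bool.or_false, h1, Bool.false_or, Bool.or_false, if_true, if_false, Bool.false_eq_true] <;> norm_num [pvLabels]
  · simp only [Bool.not_eq_true, Bool.or_eq_false_iff] at h1
    obtain ⟨f0, f1⟩ := h1
    by_cases h2 : (PySem.Str.isIn "cta" nm || PySem.Str.isIn "ctv" nm) = true
    · have key : ∃ k ∈ ["cta", "ctv"], PySem.Str.isIn k nm = true := by
        simp only [Bool.or_eq_true_iff, List.any_eq_true] at h2
        rcases h2 with h|h <;> exact ⟨_, by simp, h⟩
      obtain ⟨k, hkmem, hk⟩ := key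
      have hb : pvBestFn nm fb = pvLabels.getD 1 "" := by
        refine pvBestFn_of nm fb k 1 ?_ hk ?_ (by norm_num [pvLabels])
        · fin_cases hkmem <;> decide
        · intro p hp hpt
          fin_cases hp <;> simp_all [f0, f1]
      rw [hb]
      unfold pvChainFn
      simp only [List.any, Bool.or_false, f0, f1, h2, Bool.false_or, Bool.or_false, if_true, if_false, Bool.false_eq_true] <;> norm_num [pvLabels]
    · simp only [Bool.not_eq_true, Bool.or_eq_false_iff] at h2
      obtain ⟨f2, f3⟩ := h2
      by_cases h3 : (PySem.Str.isIn "trauma" nm) = true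
      · have key : ∃ k ∈ ["trauma"], PySem.Str.isIn k nm = true := by
          simp only [Bool.or_eq_true_iff, List.any_eq_true] at h3
          exact ⟨"trauma", by simp, h3⟩
        obtain ⟨k, hkmem, hk⟩ := key
        have hb : pvBestFn nm fb = pvLabels.getD 2 "" := by
          refine pvBestFn_of nm fb k 2 ?_ hk ?_ (by norm_num [pvLabels])
          · fin_cases hkmem <;> decide
          · intro p hp hpt
            fin_cases hp <;> simp_all [f0, f1, f2, f3]
        rw [hb]
        unfold pvChainFn
        simp only [List.any, Bool.or_false, f0, f1, f2, f3, h3, Bool.false_or, Bool.or_false, if_true, if_false, Bool.false_eq_true] <;> norm_num [pvLabels]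
      · simp only [Bool.not_eq_true] at h3
        have f4 := h3
        by_cases h4 : (PySem.Str.isIn "hrct" nm || PySem.Str.isIn "lung" nm) = true
        · have key : ∃ k ∈ ["hrct", "lung"], PySem.Str.isIn k nm = true := by
            simp only [Bool.or_eq_true_iff, List.any_eq_true] at h4
            rcases h4 with h|h <;> exact ⟨_, by simp, h⟩
          obtain ⟨k, hkmem, hk⟩ := key
          have hb : pvBestFn nm fb = pvLabels.getD 3 "" := by
            refine pvBestFn_of nm fb k 3 ?_ hk ?_ (by norm_num [pvLabels])
            · fin_cases hkmem <;> decide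
            · intro p hp hpt
              fin_cases hp <;> simp_all [f0, f1, f2, f3, f4]
          rw [hb]
          unfold pvChainFn
          simp only [List.any, Bool.or_false, f0, f1, f2, f3, f4, h4, Bool.false_or, Bool.or_false, if_true, if_false, Bool.false_eq_true] <;> norm_num [pvLabels]
        · simp only [Bool.not_eq_true, Bool.or_eq_false_iff] at h4
          obtain ⟨f5, f6⟩ := h4
          by_cases h5 : (PySem.Str.isIn "brain" nm || (PySem.Str.isIn "head" nm || (PySem.Str.isIn "stroke" nm || (PySem.Str.isIn "sinus" nm || PySem.Str.isIn "temporal" nm)))) = true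
          · have key : ∃ k ∈ ["brain", "head", "stroke", "sinus", "temporal"], PySem.Str.isIn k nm = true := by
              simp only [Bool.or_eq_true_iff, List.any_eq_true] at h5
              rcases h5 with h|h|h|h|h <;> exact ⟨_, by simp, h⟩
            obtain ⟨k, hkmem, hk⟩ := key
            have hb : pvBestFn nm fb = pvLabels.getD 4 "" := by
              refine pvBestFn_of nm fb k 4 ?_ hk ?_ (by norm_num [pvLabels])
              · fin_cases hkmem <;> decide
              · intro p hp hpt
                fin_cases hp <;> simp_all [f0, f1, f2, f3, f4, f5, f6]
            rw [hb]
            unfold pvChainFn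
            simp only [List.any, Bool.or_false, f0, f1, f2, f3, f4, f5, f6, h5, Bool.false_or, Bool.or_false, if_true, if_false, Bool.false_eq_true] <;> norm_num [pvLabels]
          · simp only [Bool.not_eq_true, Bool.or_eq_false_iff] at h5
            obtain ⟨f7, ⟨f8, ⟨f9, ⟨f10, f11⟩⟩⟩⟩ := h5
            by_cases h6 : (PySem.Str.isIn "spine" nm || PySem.Str.isIn "myelogram" nm) = true
            · have key : ∃ k ∈ ["spine", "myelogram"], PySem.Str.isIn k nm = true := by
                simp only [Bool.or_eq_true_iff, List.any_eq_true] at h6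
                rcases h6 with h|h <;> exact ⟨_, by simp, h⟩
              obtain ⟨k, hkmem, hk⟩ := key
              have hb : pvBestFn nm fb = pvLabels.getD 5 "" := by
                refine pvBestFn_of nm fb k 5 ?_ hk ?_ (by norm_num [pvLabels])
                · fin_cases hkmem <;> decide
                · intro p hp hpt
                  fin_cases hp <;> simp_all [f0, f1, f2, f3, f4, f5, f6, f7, f8, f9, f10, f11]
              rw [hb]
              unfold pvChainFn
              simp only [List.any, Bool.or_false, f0, f1, f2, f3, f4, f5, f6, f7, f8, f9, f10, f11, h6, Bool.false_or, Bool.or_false, if_true, if_false, Bool.false_eq_true] <;> norm_num [pvLabels]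
            · simp only [Bool.not_eq_true, Bool.or_eq_false_iff] at h6
              obtain ⟨f12, f13⟩ := h6
              by_cases h7 : (PySem.Str.isIn "ankle" nm || (PySem.Str.isIn "foot" nm || (PySem.Str.isIn "knee" nm || (PySem.Str.isIn "hip" nm || (PySem.Str.isIn "shoulder" nm || (PySem.Str.isIn "elbow" nm || (PySem.Str.isIn "wrist" nm || PySem.Str.isIn "hand" nm))))))) = true
              · have key : ∃ k ∈ ["ankle", "foot", "knee", "hip", "shoulder", "elbow", "wrist", "hand"], PySem.Str.isIn k nm = true := by
                  simp only [Bool.or_eq_true_iff, List.any_eq_true] at h7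
                  rcases h7 with h|h|h|h|h|h|h|h <;> exact ⟨_, by simp, h⟩
                obtain ⟨k, hkmem, hk⟩ := key
                have hb : pvBestFn nm fb = pvLabels.getD 6 "" := by
                  refine pvBestFn_of nm fb k 6 ?_ hk ?_ (by norm_num [pvLabels])
                  · fin_cases hkmem <;> decide
                  · intro p hp hpt
                    fin_cases hp <;> simp_all [f0, f1, f2, f3, f4, f5, f6, f7, f8, f9, f10, f11, f12, f13]
                rw [hb]
                unfold pvChainFn
                simp only [List.any, Bool.or_false, f0, f1, f2, f3, f4, f5, f6, f7, f8, f9, f10, f11, f12, f13, h7, Bool.false_or, Bool.or_false, if_true, if_false, Bool.false_eq_true] <;> norm_num [pvLabels]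
              · simp only [Bool.not_eq_true, Bool.or_eq_false_iff] at h7
                obtain ⟨f14, ⟨f15, ⟨f16, ⟨f17, ⟨f18, ⟨f19, ⟨f20, f21⟩⟩⟩⟩⟩⟩⟩ := h7
                -- no keyword matches: both sides fall through to fb
                have hb : pvKeywords.foldl (pvStep nm) pvLabels.length = pvLabels.length := by
                  refine pvfold_all_false nm pvKeywords _ ?_
                  intro p hp; fin_cases hp <;> simp_all
                unfold pvChainFn pvBestFn
                rw [hb]
                simp only [List.any, Bool.or_false, f0, f1, f2, f3, f4, f5, f6, f7, f8, f9, f10, f11, f12, f13, f14, f15, f16, f17, f18, f19, f20, f21, Bool.false_or, Bool.or_false, Bool.false_eq_true, if_false, Nat.lt_irrefl]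

-- ===== VERDICT =====
theorem determine_protocol_type_spec : Claim_equal_determine_protocol_type := by
  intro row _
  show determine_protocol_type row = determine_protocol_type_alt row
  have ha : determine_protocol_type row =
      pvChainFn (PySem.Str.lower ((PySem.Dict.mk row).getD "protocol_name" ""))
        (if pv_clean_value ((PySem.Dict.mk row).get? "contrast_agent") = "N/A" then "Non-Contrast" else "Contrast-Enhanced") := rfl
  have hb : determine_protocol_type_alt row =
      pvBestFn (PySem.Str.lower ((PySem.Dict.mk row).getD "protocol_name" ""))
        (if pv_clean_value ((PySem.Dict.mk row).get? "contrast_agent") = "N/A" then "Non-Contrast" else "Contrast-Enhanced") := rfl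
  rw [ha, hb, pvChainFn_eq_pvBestFn]
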